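-- pv_equiv track=rewrite | github.com/qkgia/level-up-advanced-python-3213390 | challenge/pairwise_offset.py | pairwise_offset
-- ===== SOURCE A (Python) =====
-- def pairwise_offset(sequence, fillvalue='*', offset=0):
--     result = []
--     for i in range(len(sequence) + offset):
--         second_i = (i - offset)
--
--         if second_i < 0:
--             second_value = fillvalue
--         else:
--             second_value = sequence[i - offset]
--
--         if i >= len(sequence):
--             first_value = fillvalue
--         else:
--             first_value = sequence[i]
--
--         pair = tuple([first_value, second_value])
--
--         result.append(pair)
--
--     return result
-- ===== SOURCE B (Python) =====
-- def pairwise_offset(sequence, fillvalue='*', offset=0):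
--     if offset >= 0:
--         pad = [fillvalue] * offset
--         first = list(sequence) + pad
--         second = pad + list(sequence)
--     else:
--         first = list(sequence)[:offset]
--         second = list(sequence)[-offset:]
--     return list(zip(first, second))
-- ===== Notes on version B (the rewrite author's own statement) =====
-- stated objective: idiomatic
-- what changed: Replaces the index-walking loop with bounds tests by building the two padded/sliced columns and zipping them.
import Mathlib
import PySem

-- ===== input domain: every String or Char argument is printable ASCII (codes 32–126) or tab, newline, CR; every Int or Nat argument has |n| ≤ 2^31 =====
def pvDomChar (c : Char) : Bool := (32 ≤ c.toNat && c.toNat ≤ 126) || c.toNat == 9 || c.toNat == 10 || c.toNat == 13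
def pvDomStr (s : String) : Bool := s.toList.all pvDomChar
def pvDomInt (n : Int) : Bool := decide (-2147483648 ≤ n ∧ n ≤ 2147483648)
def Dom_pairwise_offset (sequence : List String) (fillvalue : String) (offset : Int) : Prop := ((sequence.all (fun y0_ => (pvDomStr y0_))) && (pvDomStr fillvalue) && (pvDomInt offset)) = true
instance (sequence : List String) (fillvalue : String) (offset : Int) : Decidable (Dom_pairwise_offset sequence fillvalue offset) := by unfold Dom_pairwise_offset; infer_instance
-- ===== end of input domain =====

-- B replaces A's index-walking loop by padding/slicing two columns and zipping them (idiomatic, same cost).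

-- ===== PORT A =====
def pairwise_offset (sequence : List String) (fillvalue : String) (offset : Int) : List (String × String) :=
  (PySem.List.pyRange 0 ((sequence.length : Int) + offset) 1).foldl
    (fun result i =>
      let second_i := i - offset
      let second_value := if second_i < 0 then fillvalue
        else PySem.List.pyGetD sequence (i - offset) fillvalue
      let first_value := if i ≥ (sequence.length : Int) then fillvalue
        else PySem.List.pyGetD sequence i fillvalue
      result ++ [(first_value, second_value)]) []

-- ===== PORT B =====
def pairwise_offset_alt (sequence : List String) (fillvalue : String) (offset : Int) : List (String × String) :=
  if 0 ≤ offset then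
    let pad := List.replicate offset.toNat fillvalue
    List.zip (sequence ++ pad) (pad ++ sequence)
  else
    List.zip (PySem.List.slice sequence none (some offset))
             (PySem.List.slice sequence (some (-offset)) none)

-- ===== PRECONDITION & SPEC =====
def Spec_pairwise_offset (sequence : List String) (fillvalue : String) (offset : Int) (out : List (String × String)) : Prop := out = pairwise_offset_alt sequence fillvalue offset
instance (sequence : List String) (fillvalue : String) (offset : Int) (out : List (String × String)) : Decidable (Spec_pairwise_offset sequence fillvalue offset out) := by unfold Spec_pairwise_offset; infer_instance

-- ===== CLAIM (what is proved, stated in full; the proofs are below) =====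
def Claim_equal_pairwise_offset : Prop := ∀ (sequence : List String) (fillvalue : String) (offset : Int), Dom_pairwise_offset sequence fillvalue offset → Spec_pairwise_offset sequence fillvalue offset (pairwise_offset sequence fillvalue offset)

-- ===== LEMMAS AND PROOFS =====

theorem pairwise_offset_eq_map (sequence : List String) (fillvalue : String) (offset : Int) :
    pairwise_offset sequence fillvalue offset =
      (List.range ((sequence.length : Int) + offset).toNat).map (fun (k : Nat) =>
        ((if ((k : Int) ≥ (sequence.length : Int)) then fillvalue
            else PySem.List.pyGetD sequence (k : Int) fillvalue),
         (if ((k : Int) - offset < 0) then fillvalue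
            else PySem.List.pyGetD sequence ((k : Int) - offset) fillvalue))) := by
  unfold pairwise_offset
  rw [PySem.List.pyRange_one, List.foldl_map, ]
  rw [show (fun (result : List (String × String)) (k : Nat) =>
        (fun result i =>
          let second_i := i - offset
          let second_value := if second_i < 0 then fillvalue
            else PySem.List.pyGetD sequence (i - offset) fillvalue
          let first_value := if i ≥ (sequence.length : Int) then fillvalue
            else PySem.List.pyGetD sequence i fillvalue
          result ++ [(first_value, second_value)]) result ((0 : Int) + k)) =
      (fun (result : List (String × String)) (k : Nat) => result ++ [((if ((k : Int) ≥ (sequence.length : Int)) then fillvalue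
            else PySem.List.pyGetD sequence (k : Int) fillvalue),
         (if ((k : Int) - offset < 0) then fillvalue
            else PySem.List.pyGetD sequence ((k : Int) - offset) fillvalue))]) from by
        funext result k; simp]
  rw [PySem.List.foldl_append_singleton_eq_map]
  simp

theorem pairwise_offset_spec_aux (sequence : List String) (fillvalue : String) (offset : Int) :
    pairwise_offset sequence fillvalue offset = pairwise_offset_alt sequence fillvalue offset := by
  rw [pairwise_offset_eq_map]
  unfold pairwise_offset_alt
  by_cases h : 0 ≤ offset
  · simp only [if_pos h]
    apply List.ext_getElem
    · simp [List.length_zip]; omega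
    · intro i h1 h2
      simp only [List.getElem_map, List.getElem_range, List.getElem_zip]
      have hi : (i : Int) < (sequence.length : Int) + offset := by
        have := h1; rw [List.length_map, List.length_range] at this; omega
      rw [Prod.mk.injEq]
      constructor
      · by_cases hc : ((i : Int) ≥ (sequence.length : Int))
        · rw [if_pos hc, List.getElem_append_right (by omega)]
          simp
        · rw [if_neg hc]
          rw [List.getElem_append_left (by omega)]
          rw [PySem.List.pyGetD_natCast, List.getD_eq_getElem _ _ (by omega)]
      · by_cases hc : ((i : Int) - offset < 0)
        · rw [if_pos hc, List.getElem_append_left (by simp; omega)]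
          simp
        · rw [if_neg hc]
          have hj : ((i : Int) - offset) = ((i - offset.toNat : Nat) : Int) := by omega
          rw [hj, PySem.List.pyGetD_natCast, List.getD_eq_getElem _ _ (by omega)]
          rw [List.getElem_append_right (by simp; omega)]
          simp only [List.length_replicate]
  · simp only [if_neg h]
    rw [not_le] at h
    set k : Nat := (-offset).toNat with hk
    have hkpos : 0 < k := by omega
    have hoff : offset = -(k : Int) := by omega
    rw [hoff, neg_neg]
    rw [PySem.List.slice_to_neg_natCast _ _ hkpos, PySem.List.slice_from_natCast]
    apply List.ext_getElem
    · simp [List.length_zip]; omega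
    · intro i h1 h2
      simp only [List.getElem_map, List.getElem_range, List.getElem_zip]
      have hi : i < sequence.length - k := by
        have := h1; rw [List.length_map, List.length_range] at this; omega
      rw [Prod.mk.injEq]
      constructor
      · rw [if_neg (by omega), List.getElem_take]
        rw [PySem.List.pyGetD_natCast, List.getD_eq_getElem _ _ (by omega)]
      · rw [if_neg (by omega), List.getElem_drop]
        have hj : ((i : Int) - -(k : Int)) = ((i + k : Nat) : Int) := by push_cast; omega
        rw [hj, PySem.List.pyGetD_natCast, List.getD_eq_getElem _ _ (by omega)]
        congr 1
        omega

-- ===== VERDICT (by name: the statement is the Claim_ definition above) =====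
theorem pairwise_offset_spec : Claim_equal_pairwise_offset := by
  intro sequence fillvalue offset _
  exact pairwise_offset_spec_aux sequence fillvalue offset
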